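-- pv_equiv track=rewrite | github.com/frank01101/channel_explorer | tgdata.py | _get_types_count
-- ===== SOURCE A (Python) =====
-- def _get_types_count(types_list: list[str]) -> set[str]:
--         types_unique = set(types_list)
--         types_count = {
--                 f'{single_type} ({types_list.count(single_type)} '
--                 + ('time' if types_list.count(single_type) == 1
--                    else 'times')
--                 + ')'
--                 for single_type in types_unique}
--         return types_count
-- ===== SOURCE B (Python) =====
-- def _get_types_count(types_list: list[str]) -> set[str]:
--     # Repeatedly partition a shrinking worklist: take its first type, split off
--     # all its occurrences (the count falls out of the length difference), and
--     # keep going on what is left -- no set(list) upfront and no .count scans.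
--     result = set()
--     rest = types_list
--     while rest:
--         t = rest[0]
--         remaining = [x for x in rest if x != t]
--         n = len(rest) - len(remaining)
--         result.add(f'{t} ({n} ' + ('time' if n == 1 else 'times') + ')')
--         rest = remaining
--     return result
-- ===== Notes on version B (the rewrite author's own statement) =====
-- stated objective: alternative
-- what changed: Replaces A's upfront set(list) plus two full-list .count scans per unique type with a partition loop over a shrinking worklist: each step splits off all occurrences of the first remaining type, reads the count off the length difference, and continues on the leftover.
import Mathlib
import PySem

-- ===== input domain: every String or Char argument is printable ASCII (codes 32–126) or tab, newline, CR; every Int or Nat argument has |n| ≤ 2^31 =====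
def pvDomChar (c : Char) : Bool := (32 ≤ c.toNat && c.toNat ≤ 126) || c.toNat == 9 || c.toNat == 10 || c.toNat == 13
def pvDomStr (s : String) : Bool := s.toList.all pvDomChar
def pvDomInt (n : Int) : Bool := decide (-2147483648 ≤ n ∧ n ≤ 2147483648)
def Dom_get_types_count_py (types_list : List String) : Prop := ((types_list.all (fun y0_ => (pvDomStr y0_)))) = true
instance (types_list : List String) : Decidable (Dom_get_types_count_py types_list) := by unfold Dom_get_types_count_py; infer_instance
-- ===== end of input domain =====

-- B replaces A's set-of-uniques + repeated list.count scans with a partition loop over a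
-- shrinking worklist (count = length difference); alternative structure, similar cost.


-- ===== PORT A =====
-- set comprehension over set(types_list); each element formatted with types_list.count(t)
-- (the count is computed twice in A, in the f-string and in the singular test — kept as is)
def get_types_count_py (types_list : List String) : List String :=
  let types_unique : PySem.Set String := PySem.Set.ofList types_list
  PySem.Set.ofList (types_unique.map (fun single_type =>
    single_type ++ " (" ++ PySem.Int.toStr (PySem.List.count types_list single_type : Int) ++ " "
      ++ (if (PySem.List.count types_list single_type : Int) = 1 then "time" else "times") ++ ")"))

-- ===== PORT B =====
-- while rest: t = rest[0]; remaining = [x for x in rest if x != t]; n = len(rest)-len(remaining); result.add(...)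
def pvPartLoop : List String → PySem.Set String → List String
  | [], result => result
  | t :: r, result =>
      let remaining := (t :: r).filter (fun x => x != t)
      let n : Int := ((t :: r).length : Int) - (remaining.length : Int)
      pvPartLoop remaining (PySem.Set.add result
        (t ++ " (" ++ PySem.Int.toStr n ++ " "
          ++ (if n = 1 then "time" else "times") ++ ")"))
  termination_by l _ => l.length
  decreasing_by
    simp only [List.filter_cons]
    have : (r.filter (fun x => x != t)).length ≤ r.length := List.length_filter_le _ _
    simp_all

def get_types_count_py_alt (types_list : List String) : List String :=
  pvPartLoop types_list PySem.Set.empty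

-- ===== PRECONDITION & SPEC =====
def Spec_get_types_count_py (types_list : List String) (out : List String) : Prop := out = get_types_count_py_alt types_list
instance (types_list : List String) (out : List String) : Decidable (Spec_get_types_count_py types_list out) := by unfold Spec_get_types_count_py; infer_instance

-- ===== CLAIM (what is proved, stated in full; the proofs are below) =====
def Claim_equal_get_types_count_py : Prop := ∀ (types_list : List String), Dom_get_types_count_py types_list → Spec_get_types_count_py types_list (get_types_count_py types_list)

-- ===== LEMMAS AND PROOFS =====
def pvFmt (t : String) (n : Int) : String :=
  t ++ " (" ++ PySem.Int.toStr n ++ " " ++ (if n = 1 then "time" else "times") ++ ")"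

-- prepending an element absent from the rest commutes with the dedup fold
theorem pv_foldl_add_cons (t : String) :
    ∀ (r : List String) (s : List String), t ∉ r →
      List.foldl PySem.Set.add (t :: s) r = t :: List.foldl PySem.Set.add s r := by
  intro r
  induction r with
  | nil => intro s _; rfl
  | cons y ys ih =>
      intro s hn
      have hyt : (y == t) = false := by
        simp only [List.mem_cons, not_or] at hn
        simpa [beq_iff_eq] using fun h => hn.1 h.symm
      have htail : t ∉ ys := by simp only [List.mem_cons, not_or] at hn; exact hn.2
      simp only [List.foldl_cons, PySem.Set.add, PySem.Set.contains, List.contains_cons, hyt,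
        Bool.false_or]
      split_ifs with hc <;> exact ih _ htail

theorem pv_dedup_cons (t : String) (r : List String) :
    PySem.List.dedup (t :: r) = t :: PySem.List.dedup (r.filter (fun x => x != t)) := by
  have h1 : PySem.List.dedup (t :: r) = List.foldl PySem.Set.add [t] r := by
    simp [PySem.List.dedup_eq_ofList, PySem.Set.ofList_eq_foldl, PySem.Set.add, PySem.Set.empty]
  -- elements equal to t are no-ops once t is in the accumulator
  have h2 : ∀ (l : List String) (s : List String), t ∈ s →
      List.foldl PySem.Set.add s l = List.foldl PySem.Set.add s (l.filter (fun x => x != t)) := by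
    intro l
    induction l with
    | nil => intro s _; rfl
    | cons y ys ih =>
        intro s hs
        by_cases hy : y = t
        · subst hy
          have hadd : PySem.Set.add s y = s := by
            simp [PySem.Set.add, PySem.Set.contains, hs]
          simp [List.filter_cons, List.foldl_cons, hadd, ih _ hs]
        · have hmem : t ∈ PySem.Set.add s y := by
            simp only [PySem.Set.add, PySem.Set.contains]
            split <;> simp [hs]
          simp [List.filter_cons, hy, List.foldl_cons, ih _ hmem]
  have h3 : t ∉ r.filter (fun x => x != t) := by
    intro h
    simp [List.mem_filter] at h
  calc PySem.List.dedup (t :: r)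
      = List.foldl PySem.Set.add [t] r := h1
    _ = List.foldl PySem.Set.add [t] (r.filter (fun x => x != t)) := h2 r [t] (by simp)
    _ = t :: List.foldl PySem.Set.add [] (r.filter (fun x => x != t)) := pv_foldl_add_cons t _ [] h3
    _ = t :: PySem.List.dedup (r.filter (fun x => x != t)) := by
          simp [PySem.List.dedup_eq_ofList, PySem.Set.ofList_eq_foldl, PySem.Set.empty]

theorem pv_count_filter_ne (t x : String) (r : List String) (hx : x ≠ t) :
    (r.filter (fun y => y != t)).count x = r.count x := by
  induction r with
  | nil => rfl
  | cons y ys ih =>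
      by_cases hy : y = t
      · subst hy
        simp [List.filter_cons, List.count_cons, hx, Ne.symm hx, ih]
      · simp [List.filter_cons, hy, List.count_cons, ih]

theorem pv_len_split (t : String) (r : List String) :
    (r.filter (fun x => x != t)).length + List.count t r = r.length := by
  induction r with
  | nil => rfl
  | cons y ys ih =>
      by_cases hy : y = t
      · subst hy; simp [List.filter_cons, List.count_cons]; omega
      · simp [List.filter_cons, List.count_cons, hy, Ne.symm hy]; omega

theorem pvPartLoop_eq (l : List String) (s : PySem.Set String) :
    pvPartLoop l s = List.foldl PySem.Set.add s
      ((PySem.List.dedup l).map (fun t => pvFmt t (PySem.List.count l t : Int))) := by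
  have main : ∀ (n : Nat) (l : List String) (s : PySem.Set String), l.length ≤ n →
      pvPartLoop l s = List.foldl PySem.Set.add s
        ((PySem.List.dedup l).map (fun t => pvFmt t (PySem.List.count l t : Int))) := by
    intro n
    induction n with
    | zero =>
        intro l s h
        have : l = [] := List.eq_nil_of_length_eq_zero (Nat.le_zero.mp h)
        subst this
        simp [pvPartLoop, PySem.List.dedup]
    | succ n ih =>
        intro l s h
        match l with
        | [] => simp [pvPartLoop, PySem.List.dedup]
        | t :: r =>
          have hfil : (t :: r).filter (fun x => x != t) = r.filter (fun x => x != t) := by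
            simp [List.filter_cons]
          have hlen : (r.filter (fun x => x != t)).length ≤ r.length :=
            List.length_filter_le _ _
          have hsplit := pv_len_split t r
          have hcnt : ((t :: r).length : Int) - ((r.filter (fun x => x != t)).length : Int)
              = (List.count t (t :: r) : Int) := by
            have hc : List.count t (t :: r) = List.count t r + 1 := by
              simp [List.count_cons]
            simp only [List.length_cons, hc]
            omega
          rw [pvPartLoop]
          simp only [hfil]
          rw [ih (r.filter (fun x => x != t)) _ (le_trans hlen (Nat.le_of_succ_le_succ h))]
          rw [pv_dedup_cons, List.map_cons, List.foldl_cons, hcnt]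
          have hmap : (PySem.List.dedup (r.filter (fun x => x != t))).map
                (fun x => pvFmt x (PySem.List.count (r.filter (fun y => y != t)) x : Int))
              = (PySem.List.dedup (r.filter (fun x => x != t))).map
                (fun x => pvFmt x (PySem.List.count (t :: r) x : Int)) := by
            apply List.map_congr_left
            intro x hx
            have hx' : x ∈ r.filter (fun y => y != t) := by
              simpa [PySem.List.mem_dedup] using hx
            have hxne : x ≠ t := by
              have := (List.mem_filter.mp hx').2
              simpa [bne] using this
            have c1 : List.count x (List.filter (fun y => y != t) r) = List.count x r :=
              pv_count_filter_ne t x r hxne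
            have c2 : List.count x (t :: r) = List.count x r := by
              simp [List.count_cons, hxne, Ne.symm hxne]
            have : PySem.List.count (r.filter (fun y => y != t)) x
                = PySem.List.count (t :: r) x := by
              simp [PySem.List.count_eq, c1, c2]
            rw [this]
          rw [hmap]
          congr 1
  exact main l.length l s le_rfl

-- ===== VERDICT (by name: the statement is the Claim_ definition above) =====
theorem get_types_count_py_spec : Claim_equal_get_types_count_py := by
  intro types_list _
  unfold Spec_get_types_count_py get_types_count_py get_types_count_py_alt
  rw [pvPartLoop_eq]
  simp [PySem.Set.ofList_eq_foldl, PySem.List.dedup_eq_ofList, PySem.Set.empty, pvFmt]
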